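-- pv_equiv track=rewrite | github.com/artpods56/KUL_Notarius | src/notarius/infrastructure/ml_models/lmv3/utils.py | repair_bio_labels
-- ===== SOURCE A (Python) =====
-- def repair_bio_labels(labels: list[str]) -> list[str]:
--     """Repair BIO label sequences to fix invalid transitions.
--
--     Args:
--         labels: List of BIO-tagged labels
--
--     Returns:
--         List of repaired BIO labels
--     """
--     repaired: list[str] = []
--     prev_type: str | None = None
--     for i, tag in enumerate(labels):
--         if tag.startswith("B-"):
--             _, curr_type = tag.split("-", 1)
--             if prev_type == curr_type:
--                 # Consecutive B- of same type: convert to I-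
--                 repaired.append(f"I-{curr_type}")
--             else:
--                 repaired.append(tag)
--             prev_type = curr_type
--         elif tag.startswith("I-"):
--             _, curr_type = tag.split("-", 1)
--             # If previous type is not the same, or None, treat as B-
--             if prev_type != curr_type or prev_type is None:
--                 repaired.append(f"B-{curr_type}")
--             else:
--                 repaired.append(tag)
--             prev_type = curr_type
--         else:
--             repaired.append(tag)
--             prev_type = None
--     return repaired
-- ===== SOURCE B (Python) =====
-- def repair_bio_labels(labels: list[str]) -> list[str]:
--     """Repair BIO label sequences to fix invalid transitions.
--
--     Run-length re-tagging in two stages: (1) map each label to its entity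
--     type (the suffix of a B-/I- tag, None otherwise); (2) cut the sequence
--     into maximal runs of equal type and re-emit every typed run from
--     scratch as B-type followed by I-type repeats, copying untyped labels
--     verbatim.  Correct because a repaired BIO sequence is exactly the one
--     whose typed runs start with B- and continue with I-.
--     """
--
--     def type_of(tag):
--         if tag.startswith("B-") or tag.startswith("I-"):
--             return tag.split("-", 1)[1]
--         return None
--
--     typed = [(tag, type_of(tag)) for tag in labels]
--     out = []
--     i, n = 0, len(labels)
--     while i < n:
--         tag, t = typed[i]
--         if t is None:
--             out.append(tag)
--             i += 1
--         else:
--             run = 1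
--             while i + run < n and typed[i + run][1] == t:
--                 run += 1
--             out.append("B-" + t)
--             out.extend(["I-" + t] * (run - 1))
--             i += run
--     return out
-- ===== Notes on version B (the rewrite author's own statement) =====
-- stated objective: alternative
-- what changed: Replaced the stateful per-element pass threading a prev_type accumulator with a two-stage run-length algorithm: first map labels to entity types, then cut the type sequence into maximal equal-type runs and re-emit each typed run wholesale as B- followed by I- repeats, ignoring the original prefixes.
import Mathlib
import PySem

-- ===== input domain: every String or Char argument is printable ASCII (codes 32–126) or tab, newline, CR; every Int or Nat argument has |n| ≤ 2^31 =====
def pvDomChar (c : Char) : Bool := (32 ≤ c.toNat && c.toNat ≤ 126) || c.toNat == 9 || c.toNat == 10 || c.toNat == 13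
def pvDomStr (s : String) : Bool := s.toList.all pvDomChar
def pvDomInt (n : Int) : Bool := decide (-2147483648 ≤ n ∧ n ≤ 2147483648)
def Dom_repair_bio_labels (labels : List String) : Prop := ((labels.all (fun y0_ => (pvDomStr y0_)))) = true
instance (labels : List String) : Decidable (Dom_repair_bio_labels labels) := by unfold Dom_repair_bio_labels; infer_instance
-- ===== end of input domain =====

-- B replaces A's stateful accumulator pass by a two-stage run-length re-tagging
-- (entity types first, then maximal equal-type runs re-emitted as B- then I- repeats);
-- objective: alternative decomposition, same cost.

-- shared helper: Python's tag.split("-", 1)[1] (both Pythons call the same builtin; used only where the tag starts with "B-"/"I-")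
def bioSuffix (tag : String) : String :=
  match PySem.Str.splitMax? tag "-" 1 with
  | some (_ :: c :: _) => c
  | _ => ""

-- f"I-{c}" / "B-" + t
def mkTag (p : Char) (c : String) : String := String.ofList (p :: '-' :: c.toList)

-- ===== PORT A =====
def repairFold (st : List String × Option String) (tag : String) : List String × Option String :=
  if PySem.Str.startswith tag "B-" then
    let c := bioSuffix tag
    if st.2 = some c then (st.1 ++ [mkTag 'I' c], some c)
    else (st.1 ++ [tag], some c)
  else if PySem.Str.startswith tag "I-" then
    let c := bioSuffix tag
    if st.2 ≠ some c ∨ st.2 = none then (st.1 ++ [mkTag 'B' c], some c)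
    else (st.1 ++ [tag], some c)
  else (st.1 ++ [tag], none)

def repair_bio_labels (labels : List String) : List String :=
  (labels.foldl repairFold ([], none)).1

-- ===== PORT B =====
-- stage 1: the entity type of a single label (Source B's type_of)
def typeOf (tag : String) : Option String :=
  if PySem.Str.startswith tag "B-" || PySem.Str.startswith tag "I-" then some (bioSuffix tag)
  else none

-- number of following elements extending the current run (Source B's inner while)
def runLen (t : String) : List (String × Option String) → Nat
  | (_, some u) :: rest => if u = t then runLen t rest + 1 else 0
  | _ => 0

-- stage 2: Source B's outer while over the typed list, consuming one run per step
def emitRuns : List (String × Option String) → List String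
  | [] => []
  | (tag, none) :: rest => tag :: emitRuns rest
  | (_, some t) :: rest =>
      let k := runLen t rest
      mkTag 'B' t :: (List.replicate k (mkTag 'I' t) ++ emitRuns (rest.drop k))
  termination_by l => l.length
  decreasing_by
  · simp
  · rw [List.length_drop, List.length_cons]; omega

def repair_bio_labels_alt (labels : List String) : List String :=
  emitRuns (labels.map (fun tag => (tag, typeOf tag)))

-- ===== PRECONDITION & SPEC =====
def Spec_repair_bio_labels (labels : List String) (out : List String) : Prop := out = repair_bio_labels_alt labels
instance (labels : List String) (out : List String) : Decidable (Spec_repair_bio_labels labels out) := by unfold Spec_repair_bio_labels; infer_instance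

-- ===== CLAIM (what is proved, stated in full; the proofs are below) =====
def Claim_equal_repair_bio_labels : Prop := ∀ (labels : List String), Dom_repair_bio_labels labels → Spec_repair_bio_labels labels (repair_bio_labels labels)

-- ===== LEMMAS AND PROOFS =====

-- bridge: A's per-element output given the type of the previous input label
def stepA (p : Option String) (tag : String) : String :=
  if PySem.Str.startswith tag "B-" then
    if p = some (bioSuffix tag) then mkTag 'I' (bioSuffix tag) else tag
  else if PySem.Str.startswith tag "I-" then
    if p ≠ some (bioSuffix tag) ∨ p = none then mkTag 'B' (bioSuffix tag) else tag
  else tag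

def pmap (p : Option String) : List String → List String
  | [] => []
  | tag :: rest => stepA p tag :: pmap (typeOf tag) rest

-- splitting "p-rest" at the first "-" with maxsplit 1
theorem splitOnMax_cons (p : Char) (hp : p ≠ '-') (rest : List Char) :
    PySem.Chars.splitOnMax (p :: '-' :: rest) ['-'] 1 = [[p], rest] := by
  cases rest <;> simp [PySem.Chars.splitOnMax, PySem.Chars.splitOnMax.go, Ne.symm hp]

-- tag reconstruction: a tag starting with "p-" is p ++ "-" ++ its bioSuffix
theorem reconstruct (p : Char) (hp : p ≠ '-') (tag : String)
    (h : PySem.Str.startswith tag (String.ofList [p, '-']) = true) :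
    tag = mkTag p (bioSuffix tag) := by
  have hpre : [p, '-'] <+: tag.toList := by
    have := (PySem.Chars.startswith_iff tag.toList [p, '-']).1
    simpa using this (by simpa using h)
  obtain ⟨rest, hrest⟩ := hpre
  have htl : tag.toList = p :: '-' :: rest := by simpa using hrest.symm
  have hsuf : bioSuffix tag = String.ofList rest := by
    simp [bioSuffix, PySem.Str.splitMax?, PySem.Chars.splitMax?, htl, splitOnMax_cons p hp]
  calc tag = String.ofList (p :: '-' :: rest) := by rw [← htl]; simp
    _ = mkTag p (bioSuffix tag) := by rw [hsuf]; simp [mkTag]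

theorem reconstructB (tag : String) (h : PySem.Str.startswith tag "B-" = true) :
    tag = mkTag 'B' (bioSuffix tag) := reconstruct 'B' (by decide) tag (by simpa using h)

theorem reconstructI (tag : String) (h : PySem.Str.startswith tag "I-" = true) :
    tag = mkTag 'I' (bioSuffix tag) := reconstruct 'I' (by decide) tag (by simpa using h)

-- A's output on an untyped label
theorem stepA_other (tag : String) (h : typeOf tag = none) (p : Option String) :
    stepA p tag = tag := by
  simp [typeOf] at h
  simp [stepA, h.1, h.2]

-- A's output at a run start, at a run continuation, and its insensitivity to a wrong previous type
theorem stepA_none (tag t : String) (h : typeOf tag = some t) : stepA none tag = mkTag 'B' t := by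
  simp [typeOf] at h
  obtain ⟨hcond, hs⟩ := h
  by_cases hB : PySem.Chars.startswith tag.toList ['B', '-'] = true
  · have htag := reconstructB tag (by simpa using hB)
    rw [hs] at htag
    simp [stepA, hB]
    exact htag
  · have hI := hcond.resolve_left hB
    simp [stepA, hB, hI, hs]

theorem stepA_same (tag t : String) (h : typeOf tag = some t) : stepA (some t) tag = mkTag 'I' t := by
  simp [typeOf] at h
  obtain ⟨hcond, hs⟩ := h
  by_cases hB : PySem.Chars.startswith tag.toList ['B', '-'] = true
  · simp [stepA, hB, hs]
  · have hI := hcond.resolve_left hB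
    have htag := reconstructI tag (by simpa using hI)
    rw [hs] at htag
    simp [stepA, hB, hI, hs]
    exact htag

theorem stepA_irrel (t tag : String) (h : typeOf tag ≠ some t) : stepA (some t) tag = stepA none tag := by
  simp [typeOf] at h
  by_cases hB : PySem.Chars.startswith tag.toList ['B', '-'] = true
  · have hs := h (Or.inl hB)
    simp [stepA, hB, Ne.symm hs]
  · by_cases hI : PySem.Chars.startswith tag.toList ['I', '-'] = true
    · have hs := h (Or.inr hI)
      simp [stepA, hB, hI, Ne.symm hs]
    · simp [stepA, hB, hI]

theorem pmap_irrel (t tag : String) (rest : List String) (h : typeOf tag ≠ some t) :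
    pmap (some t) (tag :: rest) = pmap none (tag :: rest) := by
  simp [pmap, stepA_irrel t tag h]

-- one step of A's loop: output stepA, new state typeOf
theorem repairFold_step (acc : List String) (p : Option String) (tag : String) :
    repairFold (acc, p) tag = (acc ++ [stepA p tag], typeOf tag) := by
  by_cases hB : PySem.Chars.startswith tag.toList ['B', '-'] = true <;>
    by_cases hI : PySem.Chars.startswith tag.toList ['I', '-'] = true <;>
      simp [repairFold, stepA, typeOf, hB, hI] <;> split_ifs <;> simp_all

theorem foldA_eq (l : List String) : ∀ (p : Option String) (acc : List String),
    (l.foldl repairFold (acc, p)).1 = acc ++ pmap p l := by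
  induction l with
  | nil => intro p acc; simp [pmap]
  | cons tag rest ih =>
    intro p acc
    simp only [List.foldl_cons, repairFold_step, pmap, ih]
    simp

-- main bridge: B's run emission equals A's per-element map, both parts by strong induction
theorem emit_run_eq (n : Nat) : ∀ (l : List String), l.length = n →
    (emitRuns (l.map (fun tag => (tag, typeOf tag))) = pmap none l ∧
     ∀ t : String,
       List.replicate (runLen t (l.map (fun tag => (tag, typeOf tag)))) (mkTag 'I' t) ++
         emitRuns ((l.map (fun tag => (tag, typeOf tag))).drop
           (runLen t (l.map (fun tag => (tag, typeOf tag))))) = pmap (some t) l) := by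
  induction n using Nat.strong_induction_on with
  | _ n ih =>
    intro l hlen
    cases l with
    | nil => exact ⟨by simp [emitRuns.eq_1, pmap], fun t => by simp [emitRuns.eq_1, pmap, runLen]⟩
    | cons tag rest =>
      have hrest : rest.length < n := by simp at hlen; omega
      have IH := ih rest.length hrest rest rfl
      have hemit : emitRuns ((tag, typeOf tag) :: rest.map (fun tag => (tag, typeOf tag))) =
          pmap none (tag :: rest) := by
        cases htype : typeOf tag with
        | none =>
          rw [emitRuns.eq_2, IH.1]
          simp only [pmap, htype, stepA_other tag htype none]
        | some t =>
          rw [emitRuns.eq_3, IH.2 t]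
          simp only [pmap, htype, stepA_none tag t htype]
      refine ⟨by simpa using hemit, fun t => ?_⟩
      simp only [List.map_cons]
      cases htype : typeOf tag with
      | none =>
        have hemit' := hemit; rw [htype] at hemit'
        have h0 : runLen t ((tag, (none : Option String)) ::
            rest.map (fun tag => (tag, typeOf tag))) = 0 := by simp [runLen]
        rw [h0, List.replicate_zero, List.drop_zero, List.nil_append]
        exact hemit'.trans (pmap_irrel t tag rest (by simp [htype])).symm
      | some u =>
        by_cases hut : u = t
        · subst hut
          have hk : runLen u ((tag, some u) :: rest.map (fun tag => (tag, typeOf tag))) =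
              runLen u (rest.map (fun tag => (tag, typeOf tag))) + 1 := by simp [runLen]
          rw [hk, List.replicate_succ, List.drop_succ_cons, List.cons_append, IH.2 u]
          simp only [pmap, htype, stepA_same tag u htype]
        · have hemit' := hemit; rw [htype] at hemit'
          have h0 : runLen t ((tag, some u) :: rest.map (fun tag => (tag, typeOf tag))) = 0 := by
            simp [runLen, hut]
          rw [h0, List.replicate_zero, List.drop_zero, List.nil_append]
          exact hemit'.trans (pmap_irrel t tag rest (by simp [htype, hut])).symm

-- ===== VERDICT (by name: the statement is the Claim_ definition above) =====
theorem repair_bio_labels_spec : Claim_equal_repair_bio_labels := by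
  intro labels _
  show repair_bio_labels labels = repair_bio_labels_alt labels
  have h := (emit_run_eq labels.length labels rfl).1
  rw [repair_bio_labels, foldA_eq labels none [], repair_bio_labels_alt, h]
  simp
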